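-- pv_equiv track=rewrite | github.com/posl/comment_recommendation | script/mod_gen/4_time/ja/198_C/9.py | cnt_step
-- ===== SOURCE A (Python) =====
-- def cnt_step(r, x, y):
--     if r**2 == x**2 + y**2:
--         return int(r)
--     elif r**2 > x**2 + y**2:
--         return int(r+1)
--     else:
--         cnt = 0
--         while True:
--             if r**2 == x**2 + y**2:
--                 return int(cnt)
--             elif r**2 > x**2 + y**2:
--                 return int(cnt+2)
--             else:
--                 cnt += 2
--                 r += 1
-- ===== SOURCE B (Python) =====
-- def _isqrt(n):
--     if n == 0:
--         return 0
--     x = n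
--     while True:
--         y = (x + n // x) // 2
--         if y < x:
--             x = y
--         else:
--             return x
--
--
-- def cnt_step(r, x, y):
--     s = x * x + y * y
--     if r * r == s:
--         return int(r)
--     if r * r > s:
--         return int(r + 1)
--     t = _isqrt(s)
--     if t * t == s:
--         return 2 * (t - r)
--     return 2 * (t + 1 - r) + 2
-- ===== Notes on version B (the rewrite author's own statement) =====
-- stated objective: faster
-- what changed: Replaces A's unit-step while loop (increment r and cnt until r*r reaches x*x+y*y) with a closed form 2*(ceil(sqrt(s))-r)(+2 if not a perfect square) using a Newton-iteration integer square root.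
import Mathlib
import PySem

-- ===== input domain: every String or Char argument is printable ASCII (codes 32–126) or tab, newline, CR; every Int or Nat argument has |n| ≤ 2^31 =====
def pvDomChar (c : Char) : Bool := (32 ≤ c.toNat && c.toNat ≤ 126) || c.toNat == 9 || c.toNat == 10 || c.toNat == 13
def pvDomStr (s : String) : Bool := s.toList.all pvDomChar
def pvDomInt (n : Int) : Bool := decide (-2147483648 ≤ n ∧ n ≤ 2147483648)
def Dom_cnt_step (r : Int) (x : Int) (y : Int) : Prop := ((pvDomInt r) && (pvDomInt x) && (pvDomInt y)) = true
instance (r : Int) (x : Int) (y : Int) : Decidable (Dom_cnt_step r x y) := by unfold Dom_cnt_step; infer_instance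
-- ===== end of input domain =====

-- B replaces A's unit-step counting loop by a closed form from a Newton-iteration integer
-- square root of x^2+y^2 (objective: faster, asymptotically fewer iterations).

-- ===== PORT A =====
-- the `while True` loop of A: state (r, cnt); termination: r increases while r^2 < s
def cntLoop (s : Int) (r : Int) (cnt : Int) : Int :=
  if r ^ 2 = s then cnt
  else if r ^ 2 > s then cnt + 2
  else cntLoop s (r + 1) (cnt + 2)
termination_by (s - r).toNat
decreasing_by
  rename_i h1 h2
  have hlt : r ^ 2 < s := lt_of_le_of_ne (not_lt.mp h2) h1
  have hr : r < s := by nlinarith [sq_nonneg (r - 1), sq_nonneg r]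
  omega

def cnt_step (r : Int) (x : Int) (y : Int) : Int :=
  if r ^ 2 = x ^ 2 + y ^ 2 then r
  else if r ^ 2 > x ^ 2 + y ^ 2 then r + 1
  else cntLoop (x ^ 2 + y ^ 2) r 0

-- ===== PORT B =====
-- the `while True` loop of _isqrt; the extra `0 ≤ yv` in the guard is a totality guard only
-- (for the n ≥ 1 this is called with, yv ≥ 1 always holds, so it matches the Python loop)
def isqrtGo (n : Int) (xv : Int) : Int :=
  let yv := PySem.Int.floordiv (xv + PySem.Int.floordiv n xv) 2
  if _h : 0 ≤ yv ∧ yv < xv then isqrtGo n yv else xv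
termination_by xv.toNat
decreasing_by omega

def isqrtB (n : Int) : Int :=
  if n = 0 then 0 else isqrtGo n n

def cnt_step_alt (r : Int) (x : Int) (y : Int) : Int :=
  let s := x * x + y * y
  if r * r = s then r
  else if r * r > s then r + 1
  else
    let t := isqrtB s
    if t * t = s then 2 * (t - r) else 2 * (t + 1 - r) + 2

-- ===== PRECONDITION & SPEC =====
def Spec_cnt_step (r : Int) (x : Int) (y : Int) (out : Int) : Prop := out = cnt_step_alt r x y
instance (r : Int) (x : Int) (y : Int) (out : Int) : Decidable (Spec_cnt_step r x y out) := by unfold Spec_cnt_step; infer_instance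

-- ===== CLAIM (what is proved, stated in full; the proofs are below) =====
def Claim_equal_cnt_step : Prop := ∀ (r : Int) (x : Int) (y : Int), Dom_cnt_step r x y → Spec_cnt_step r x y (cnt_step r x y)

-- ===== LEMMAS AND PROOFS =====

-- integer-sqrt characterisation is unique
theorem pv_sqrt_unique (s t t' : Int) (ht0 : 0 ≤ t) (ht1 : t * t ≤ s) (ht2 : s < (t + 1) * (t + 1))
    (hu0 : 0 ≤ t') (hu1 : t' * t' ≤ s) (hu2 : s < (t' + 1) * (t' + 1)) : t = t' := by
  by_contra hne
  rcases lt_or_gt_of_ne hne with h | h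
  · nlinarith
  · nlinarith

-- Newton loop computes the integer sqrt, given a start point above it
theorem pv_isqrtGo_eq (n t : Int) (ht : 1 ≤ t) (h1 : t * t ≤ n) (h2 : n < (t + 1) * (t + 1)) :
    ∀ (k : Nat) (xv : Int), xv.toNat ≤ k → t ≤ xv → isqrtGo n xv = t := by
  intro k
  induction k with
  | zero => intro xv hk hx; omega
  | succ k ih =>
    intro xv hk hx
    have hxpos : 0 < xv := lt_of_lt_of_le ht hx
    rw [isqrtGo]
    have hd1 : 2 * t - xv ≤ PySem.Int.floordiv n xv := by
      rw [PySem.Int.le_floordiv_iff_mul_le hxpos]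
      nlinarith [sq_nonneg (xv - t)]
    have hyt : t ≤ PySem.Int.floordiv (xv + PySem.Int.floordiv n xv) 2 := by
      rw [PySem.Int.le_floordiv_iff_mul_le (by norm_num : (0:Int) < 2)]
      omega
    split_ifs with h
    · exact ih _ (by omega) hyt
    · -- loop exit: xv ≤ yv, show xv = t
      have hxy : xv ≤ PySem.Int.floordiv (xv + PySem.Int.floordiv n xv) 2 := by omega
      rw [PySem.Int.le_floordiv_iff_mul_le (by norm_num : (0:Int) < 2)] at hxy
      have hnx : xv ≤ PySem.Int.floordiv n xv := by omega
      rw [PySem.Int.le_floordiv_iff_mul_le hxpos] at hnx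
      have : xv ≤ t := by nlinarith
      omega

-- closed form of A's counting loop
theorem pv_cntLoop_eq (s t : Int) (ht : 1 ≤ t) (h1 : t * t ≤ s) (h2 : s < (t + 1) * (t + 1)) :
    ∀ (k : Nat) (r cnt : Int), (t + 1 - r).toNat ≤ k → r ^ 2 < s →
      cntLoop s r cnt = cnt + (if t * t = s then 2 * (t - r) else 2 * (t + 1 - r) + 2) := by
  intro k
  induction k with
  | zero =>
    intro r cnt hk hr
    have hrle : r ≤ t := by nlinarith [sq_nonneg r]
    omega
  | succ k ih =>
    intro r cnt hk hr
    have hrle : r ≤ t := by nlinarith [sq_nonneg r]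
    rw [cntLoop]
    rw [if_neg (by omega), if_neg (by omega)]
    rcases lt_trichotomy ((r + 1) ^ 2) s with hc | hc | hc
    · have hr1le : r + 1 ≤ t := by nlinarith [sq_nonneg (r + 1)]
      rw [ih (r + 1) (cnt + 2) (by omega) hc]
      split_ifs <;> ring
    · -- (r+1)^2 = s : loop returns cnt+2 and t = r+1, s a perfect square
      rw [cntLoop, if_pos hc]
      have hr1pos : 1 ≤ r + 1 := by nlinarith [sq_nonneg (r + 1)]
      have : t = r + 1 := pv_sqrt_unique s t (r + 1) (by omega) h1 h2 (by omega) (by nlinarith) (by nlinarith)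
      subst this
      rw [if_pos (by nlinarith)]
      ring
    · -- (r+1)^2 > s : loop returns cnt+4 and t = r, s not a perfect square
      rw [cntLoop, if_neg (by omega), if_pos hc]
      have hrpos : 1 ≤ r := by nlinarith [sq_nonneg r, sq_nonneg (r + 1)]
      have : t = r := pv_sqrt_unique s t r (by omega) h1 h2 (by omega) (by nlinarith) (by nlinarith)
      subst this
      rw [if_neg (by nlinarith)]
      ring

-- ===== VERDICT (by name: the statement is the Claim_ definition above) =====
theorem cnt_step_spec : Claim_equal_cnt_step := by
  intro r x y _
  unfold Spec_cnt_step cnt_step cnt_step_alt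
  have hs : x ^ 2 + y ^ 2 = x * x + y * y := by ring
  have hr2 : r ^ 2 = r * r := by ring
  simp only [hs, hr2]
  split_ifs with hEq hGt hSq hSq
  · rfl
  · rfl
  all_goals {
    have hlt : r * r < x * x + y * y := lt_of_le_of_ne (not_lt.mp hGt) hEq
    set s : Int := x * x + y * y with hsdef
    have hspos : 1 ≤ s := by nlinarith [sq_nonneg r, mul_self_nonneg r]
    -- t := integer sqrt of s, via Mathlib's Nat.sqrt
    set t : Int := ((Nat.sqrt s.toNat : Nat) : Int) with htdef
    have hts : s.toNat = s := by omega
    have h1 : t * t ≤ s := by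
      have h := Nat.sqrt_le' s.toNat
      rw [htdef]; push_cast [pow_two] at h ⊢; omega
    have h2 : s < (t + 1) * (t + 1) := by
      have h := Nat.lt_succ_sqrt' s.toNat
      have h' : (s.toNat : Int) < ((Nat.sqrt s.toNat + 1 : Nat) : Int) * ((Nat.sqrt s.toNat + 1 : Nat) : Int) := by
        exact_mod_cast Nat.lt_of_lt_of_le h (by rw [pow_two])
      rw [htdef]; push_cast at h'; omega
    have ht1 : 1 ≤ t := by
      have : 0 < Nat.sqrt s.toNat := Nat.sqrt_pos.mpr (by omega)
      omega
    have hiso : isqrtB s = t := by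
      unfold isqrtB
      rw [if_neg (by omega)]
      exact pv_isqrtGo_eq s t ht1 h1 h2 s.toNat s (by omega) (by nlinarith)
    rw [hiso] at hSq ⊢
    have hloop := pv_cntLoop_eq s t ht1 h1 h2 (t + 1 - r).toNat r 0 (le_refl _) (by rw [hr2]; exact hlt)
    rw [hloop]
    split_ifs <;> simp_all
  }
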